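-- pv_equiv track=rewrite | github.com/masonc08/algs | algorithms/sort_chessboard_submatrix.py | sort_chessboard_submatrix
-- ===== SOURCE A (Python) =====
-- from typing import List
-- from heapq import heappush, heappop
--
-- def sort_chessboard_submatrix(chessboard: List[List[int]], queries: List[List[int]]) -> List[List[int]]:
--     for query in queries:
--         start = (query[0], query[1])
--         w = query[2]
--         i = start[0]
--         black_start = True
--         blacks, whites = [], []
--         while i < start[0]+w:
--             j = start[1]
--             black_tile = black_start
--             while j < start[1]+w:
--                 if black_tile:
--                     heappush(blacks, chessboard[i][j])
--                 else:
--                     heappush(whites, chessboard[i][j])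
--                 black_tile = not black_tile
--                 j += 1
--             black_start = not black_start
--             i += 1
--         black_start = True
--         i = start[0]
--         while i < start[0]+w:
--             j = start[1]
--             black_tile = black_start
--             while j < start[1]+w:
--                 if black_tile:
--                     chessboard[i][j] = heappop(blacks)
--                 else:
--                     chessboard[i][j] = heappop(whites)
--                 black_tile = not black_tile
--                 j += 1
--             black_start = not black_start
--             i += 1
--     return chessboard
-- ===== SOURCE B (Python) =====
-- from typing import List
--
-- def sort_chessboard_submatrix(chessboard: List[List[int]], queries: List[List[int]]) -> List[List[int]]:
--     for q in queries:
--         r0, c0, w = q[0], q[1], q[2]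
--         cells = [(i, j) for i in range(r0, r0 + w) for j in range(c0, c0 + w)]
--         colour = lambda p: (p[0] + p[1] - r0 - c0) % 2
--         # stable sort of the POSITIONS by colour: black slots (row-major), then white slots
--         slots = sorted(cells, key=colour)
--         # radix trick: stable-sort positions by value, then by colour -> values land in
--         # (colour, value)-lexicographic order; snapshot them before mutating
--         order = sorted(sorted(cells, key=lambda p: chessboard[p[0]][p[1]]), key=colour)
--         vals = [chessboard[a][b] for (a, b) in order]
--         for (i, j), v in zip(slots, vals):
--             chessboard[i][j] = v
--     return chessboard
-- ===== Notes on version B (the rewrite author's own statement) =====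
-- stated objective: alternative
-- what changed: Instead of A's two heaps fed and drained cell-by-cell through a threaded colour flag, B sorts the submatrix POSITIONS: a stable sort of the cell list by colour yields the slot order, a two-pass stable (radix) sort of the same cells by value then by colour yields the source order, and a single zip assigns snapshot values to slots with no per-cell branching during the write.
-- outside the precondition, e.g. on sort_chessboard_submatrix([[2, -1, -2]], [[-1, -2, 2, -1]]): A returns [[2, -1, -1]], B returns [[2, -1, -2]]
import Mathlib
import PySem

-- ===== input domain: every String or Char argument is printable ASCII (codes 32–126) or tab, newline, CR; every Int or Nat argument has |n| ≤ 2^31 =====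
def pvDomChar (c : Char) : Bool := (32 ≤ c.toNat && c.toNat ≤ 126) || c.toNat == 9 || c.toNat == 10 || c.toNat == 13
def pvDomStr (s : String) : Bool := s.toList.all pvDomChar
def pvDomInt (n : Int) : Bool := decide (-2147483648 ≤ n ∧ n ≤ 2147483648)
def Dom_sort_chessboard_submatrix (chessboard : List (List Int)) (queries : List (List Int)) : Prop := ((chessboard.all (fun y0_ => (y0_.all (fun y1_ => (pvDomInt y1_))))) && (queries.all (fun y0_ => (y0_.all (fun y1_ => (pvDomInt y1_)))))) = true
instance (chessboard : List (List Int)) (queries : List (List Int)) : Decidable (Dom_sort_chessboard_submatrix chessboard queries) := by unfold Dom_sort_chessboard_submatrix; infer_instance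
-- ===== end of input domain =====

-- B replaces A's two per-cell-fed heaps and threaded colour flag by sorting the submatrix
-- POSITIONS: a stable sort of the cell list by colour gives the slot order, a two-pass
-- stable (radix) sort by value then by colour gives the source order, and one zip assigns
-- the snapshot values to the slots (an alternative of the same asymptotic cost).
-- Both Pythons mutate `chessboard` in place; the equivalence proved here is about the
-- returned value (under Pre_ the final mutated state coincides as well, though the two
-- programs write the cells in a different intermediate order).

-- shared helpers: the expressions chessboard[i][j] (read) and chessboard[i][j] = v (write),
-- which both Pythons use verbatim (Python index semantics incl. negative wrap; the defaults
-- are only reached outside Pre_)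
def pvGetCell (bd : List (List Int)) (i j : Int) : Int :=
  PySem.List.pyGetD (PySem.List.pyGetD bd i []) j 0

def pvSetCell (bd : List (List Int)) (i j : Int) (v : Int) : List (List Int) :=
  PySem.List.pySetD bd i (PySem.List.pySetD (PySem.List.pyGetD bd i []) j v)

-- ===== PORT A =====
-- heapq is observed only through heappop: the heap is kept as the list of pushed elements
-- (heappush = append) and pvHeappop returns the minimum and removes one minimal occurrence —
-- exactly heappop's observable behaviour on ints. pvHeappop [] is unreachable (A pops exactly
-- as many times as it pushed); Python would raise IndexError there.
def pvHeappop : List Int → Int × List Int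
  | [] => (0, [])
  | [x] => (x, [])
  | x :: y :: t =>
      let p := pvHeappop (y :: t)
      if x ≤ p.1 then (x, y :: t) else (p.1, x :: p.2)

-- inner while loop of A's first pass: state ((blacks, whites), black_tile)
def pvA_readStep (bd : List (List Int)) (i : Int)
    (s : (List Int × List Int) × Bool) (j : Int) : (List Int × List Int) × Bool :=
  (if s.2 then (s.1.1 ++ [pvGetCell bd i j], s.1.2)
   else (s.1.1, s.1.2 ++ [pvGetCell bd i j]), !s.2)

def pvA_readRow (bd : List (List Int)) (i c0 chi : Int)
    (st : (List Int × List Int) × Bool) : (List Int × List Int) × Bool :=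
  (PySem.List.pyRange c0 chi 1).foldl (pvA_readStep bd i) st

-- outer while loop of A's first pass: state ((blacks, whites), black_start)
def pvA_readRows (bd : List (List Int)) (c0 chi : Int)
    (s : (List Int × List Int) × Bool) (i : Int) : (List Int × List Int) × Bool :=
  ((pvA_readRow bd i c0 chi s).1, !s.2)

def pvA_read (bd : List (List Int)) (r0 c0 rhi chi : Int) : List Int × List Int :=
  ((PySem.List.pyRange r0 rhi 1).foldl (pvA_readRows bd c0 chi) (([], []), true)).1

-- inner while loop of A's second pass: state ((board, blacks, whites), black_tile)
def pvA_writeStep (i : Int)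
    (s : (List (List Int) × List Int × List Int) × Bool) (j : Int) :
    (List (List Int) × List Int × List Int) × Bool :=
  if s.2 then
    ((pvSetCell s.1.1 i j (pvHeappop s.1.2.1).1, (pvHeappop s.1.2.1).2, s.1.2.2), !s.2)
  else
    ((pvSetCell s.1.1 i j (pvHeappop s.1.2.2).1, s.1.2.1, (pvHeappop s.1.2.2).2), !s.2)

def pvA_writeRow (i c0 chi : Int)
    (st : (List (List Int) × List Int × List Int) × Bool) :
    (List (List Int) × List Int × List Int) × Bool :=
  (PySem.List.pyRange c0 chi 1).foldl (pvA_writeStep i) st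

-- outer while loop of A's second pass
def pvA_writeRows (c0 chi : Int)
    (s : (List (List Int) × List Int × List Int) × Bool) (i : Int) :
    (List (List Int) × List Int × List Int) × Bool :=
  ((pvA_writeRow i c0 chi s).1, !s.2)

def pvA_write (bd : List (List Int)) (r0 c0 rhi chi : Int) (hb hw : List Int) :
    List (List Int) :=
  ((PySem.List.pyRange r0 rhi 1).foldl (pvA_writeRows c0 chi) ((bd, hb, hw), true)).1.1

-- one iteration of A's `for query in queries` loop
def pvA_query (bd : List (List Int)) (q : List Int) : List (List Int) :=
  let r0 := PySem.List.pyGetD q 0 0      -- query[0] (Pre_ guarantees len(query) ≥ 3)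
  let c0 := PySem.List.pyGetD q 1 0
  let w  := PySem.List.pyGetD q 2 0
  let bw := pvA_read bd r0 c0 (r0 + w) (c0 + w)
  pvA_write bd r0 c0 (r0 + w) (c0 + w) bw.1 bw.2

def sort_chessboard_submatrix (chessboard : List (List Int)) (queries : List (List Int)) :
    List (List Int) :=
  queries.foldl pvA_query chessboard

-- ===== PORT B =====
-- the cell-position comprehension of Source B (row-major)
def pvB_cells (r0 c0 w : Int) : List (Int × Int) :=
  (PySem.List.pyRange r0 (r0 + w) 1).flatMap (fun i =>
    (PySem.List.pyRange c0 (c0 + w) 1).map (fun j => (i, j)))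

-- Source B's `colour` lambda
def pvB_colour (r0 c0 : Int) (p : Int × Int) : Int :=
  PySem.Int.mod (p.1 + p.2 - r0 - c0) 2

-- one iteration of Source B's `for q in queries` loop
def pvB_query (bd : List (List Int)) (q : List Int) : List (List Int) :=
  let r0 := PySem.List.pyGetD q 0 0
  let c0 := PySem.List.pyGetD q 1 0
  let w  := PySem.List.pyGetD q 2 0
  let cells := pvB_cells r0 c0 w
  let slots := PySem.List.sorted cells (pvB_colour r0 c0) false
  let order := PySem.List.sorted
      (PySem.List.sorted cells (fun p => pvGetCell bd p.1 p.2) false)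
      (pvB_colour r0 c0) false
  let vals := order.map (fun p => pvGetCell bd p.1 p.2)
  (slots.zip vals).foldl (fun b pv => pvSetCell b pv.1.1 pv.1.2 pv.2) bd

def sort_chessboard_submatrix_alt (chessboard : List (List Int)) (queries : List (List Int)) :
    List (List Int) :=
  queries.foldl pvB_query chessboard

-- ===== PRECONDITION & SPEC =====
-- per-query condition (on the shape of the board only)
def pvPreQ (bd : List (List Int)) (q : List Int) : Prop :=
  3 ≤ q.length ∧
    (PySem.List.pyGetD q 2 0 ≤ 0 ∨
      (-(bd.length : Int) ≤ PySem.List.pyGetD q 0 0 ∧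
       PySem.List.pyGetD q 0 0 + PySem.List.pyGetD q 2 0 ≤ (bd.length : Int) ∧
       PySem.List.pyGetD q 2 0 ≤ (bd.length : Int) ∧
       ∀ i ∈ PySem.List.pyRange (PySem.List.pyGetD q 0 0)
                (PySem.List.pyGetD q 0 0 + PySem.List.pyGetD q 2 0) 1,
         -(((PySem.List.pyGetD bd i ([] : List Int)).length : Int)) ≤ PySem.List.pyGetD q 1 0 ∧
         PySem.List.pyGetD q 1 0 + PySem.List.pyGetD q 2 0 ≤
           ((PySem.List.pyGetD bd i ([] : List Int)).length : Int) ∧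
         PySem.List.pyGetD q 2 0 ≤
           ((PySem.List.pyGetD bd i ([] : List Int)).length : Int)))

-- Pre_ excludes the inputs where A raises (queries shorter than 3, windows reaching an
-- out-of-range index) and, besides, SELF-ALIASING windows (w larger than the board height
-- or a row length, reachable only with a negative start through Python's wraparound
-- indexing): there the window covers the same physical cell twice and A's value depends on
-- its accidental interleaved write order.
def Pre_sort_chessboard_submatrix (chessboard : List (List Int)) (queries : List (List Int)) : Prop :=
  ∀ q ∈ queries, pvPreQ chessboard q

instance (chessboard : List (List Int)) (queries : List (List Int)) :
    Decidable (Pre_sort_chessboard_submatrix chessboard queries) := by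
  unfold Pre_sort_chessboard_submatrix pvPreQ; infer_instance

def pvWitness_sort_chessboard_submatrix : List (List Int) × List (List Int) :=
  ([[3, 1], [2, 4]], [[0, 0, 2]])

def Spec_sort_chessboard_submatrix (chessboard : List (List Int)) (queries : List (List Int)) (out : List (List Int)) : Prop := out = sort_chessboard_submatrix_alt chessboard queries
instance (chessboard : List (List Int)) (queries : List (List Int)) (out : List (List Int)) : Decidable (Spec_sort_chessboard_submatrix chessboard queries out) := by unfold Spec_sort_chessboard_submatrix; infer_instance

-- ===== CLAIM =====
def Claim_equal_sort_chessboard_submatrix : Prop := ∀ (chessboard : List (List Int)) (queries : List (List Int)), Dom_sort_chessboard_submatrix chessboard queries → Pre_sort_chessboard_submatrix chessboard queries → Spec_sort_chessboard_submatrix chessboard queries (sort_chessboard_submatrix chessboard queries)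

-- ===== LEMMAS AND PROOFS =====

-- ---- proof-side middle form M: A's heaps made explicit (gather row-major by parity,
-- sort once, consume heads) — the shape the old-style invariants below establish for A ----
def pvM_gather (bd : List (List Int)) (r0 c0 rhi chi p : Int) : List Int :=
  (PySem.List.pyRange r0 rhi 1).flatMap (fun i =>
    ((PySem.List.pyRange c0 chi 1).filter
        (fun j => decide (PySem.Int.mod (i + j - r0 - c0) 2 = p))).map
      (fun j => pvGetCell bd i j))

def pvM_assignStep (i r0 c0 : Int) (s : List (List Int) × List Int × List Int)
    (j : Int) : List (List Int) × List Int × List Int :=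
  if PySem.Int.mod (i + j - r0 - c0) 2 = 0 then
    (pvSetCell s.1 i j (s.2.1.headD 0), s.2.1.tail, s.2.2)
  else
    (pvSetCell s.1 i j (s.2.2.headD 0), s.2.1, s.2.2.tail)

def pvM_assignRow (i r0 c0 chi : Int) (st : List (List Int) × List Int × List Int) :
    List (List Int) × List Int × List Int :=
  (PySem.List.pyRange c0 chi 1).foldl (pvM_assignStep i r0 c0) st

def pvM_assignRows (r0 c0 chi : Int) (s : List (List Int) × List Int × List Int)
    (i : Int) : List (List Int) × List Int × List Int :=
  pvM_assignRow i r0 c0 chi s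

def pvM_query (bd : List (List Int)) (q : List Int) : List (List Int) :=
  let r0 := PySem.List.pyGetD q 0 0
  let c0 := PySem.List.pyGetD q 1 0
  let w  := PySem.List.pyGetD q 2 0
  let blacks := PySem.List.sorted (pvM_gather bd r0 c0 (r0 + w) (c0 + w) 0) (fun x => x) false
  let whites := PySem.List.sorted (pvM_gather bd r0 c0 (r0 + w) (c0 + w) 1) (fun x => x) false
  ((PySem.List.pyRange r0 (r0 + w) 1).foldl (pvM_assignRows r0 c0 (c0 + w))
    (bd, blacks, whites)).1

-- parity arithmetic
lemma pvMod2_succ (x : Int) :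
    PySem.Int.mod (x + 1) 2 = 0 ↔ ¬ PySem.Int.mod x 2 = 0 := by
  simp only [PySem.Int.mod_eq_emod_of_pos (show (0:Int) < 2 by omega)]
  omega

lemma pvMod2_one_iff (x : Int) :
    PySem.Int.mod x 2 = 1 ↔ ¬ PySem.Int.mod x 2 = 0 := by
  simp only [PySem.Int.mod_eq_emod_of_pos (show (0:Int) < 2 by omega)]
  omega

lemma pvFlip (x : Int) :
    (!decide (PySem.Int.mod x 2 = 0)) = decide (PySem.Int.mod (x + 1) 2 = 0) := by
  by_cases hp : PySem.Int.mod x 2 = 0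
  · have h1 : ¬ PySem.Int.mod (x + 1) 2 = 0 := fun hh => (pvMod2_succ x).mp hh hp
    rw [decide_eq_true hp, decide_eq_false h1]; rfl
  · have h1 : PySem.Int.mod (x + 1) 2 = 0 := (pvMod2_succ x).mpr hp
    rw [decide_eq_false hp, decide_eq_true h1]; rfl

-- pvHeappop returns the minimum and removes one minimal occurrence
lemma pvHeappop_perm : ∀ (h : List Int), h ≠ [] →
    ((pvHeappop h).1 :: (pvHeappop h).2).Perm h := by
  intro h
  induction h with
  | nil => intro hne; exact absurd rfl hne
  | cons x t ih =>
    intro _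
    cases t with
    | nil => simp [pvHeappop]
    | cons y t' =>
      have hperm := ih (by simp)
      simp only [pvHeappop]
      by_cases hx : x ≤ (pvHeappop (y :: t')).1
      · simp [hx]
      · simp only [if_neg hx]
        exact (List.Perm.swap x (pvHeappop (y :: t')).1 (pvHeappop (y :: t')).2).trans
          (List.Perm.cons x hperm)

lemma pvHeappop_min : ∀ (h : List Int), h ≠ [] →
    ∀ y ∈ h, (pvHeappop h).1 ≤ y := by
  intro h
  induction h with
  | nil => intro hne; exact absurd rfl hne
  | cons x t ih =>
    intro _
    cases t with
    | nil => intro y hy; simp at hy; simp [pvHeappop, hy]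
    | cons z t' =>
      intro y hy
      have hmin := ih (by simp)
      simp only [pvHeappop]
      by_cases hx : x ≤ (pvHeappop (z :: t')).1
      · simp only [if_pos hx]
        rcases List.mem_cons.mp hy with rfl | hy'
        · exact le_refl y
        · exact le_trans hx (hmin y hy')
      · simp only [if_neg hx]
        rcases List.mem_cons.mp hy with rfl | hy'
        · exact le_of_lt (lt_of_not_ge hx)
        · exact hmin y hy'

-- the sorted list of a heap is: the popped minimum, then the sorted remainder
lemma pvSorted_heappop (h : List Int) (hne : h ≠ []) :
    PySem.List.sorted h (fun x => x) false
      = (pvHeappop h).1 :: PySem.List.sorted (pvHeappop h).2 (fun x => x) false := by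
  apply PySem.List.sorted_id_eq_of_perm_of_pairwise
  · exact (List.Perm.cons _ (PySem.List.sorted_perm _ _ _)).trans (pvHeappop_perm h hne)
  · refine List.pairwise_cons.mpr ⟨?_, ?_⟩
    · intro y hy
      have hy' : y ∈ (pvHeappop h).2 := (PySem.List.mem_sorted _ _ _ _).mp hy
      have : y ∈ h := (pvHeappop_perm h hne).mem_iff.mp (List.mem_cons_of_mem _ hy')
      exact pvHeappop_min h hne y this
    · have := PySem.List.sorted_pairwise (pvHeappop h).2 (fun x : Int => x)
      simpa using this

-- first pass, one row: A's flag-threaded loop collects exactly the two parity-filtered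
-- row-major lists of M's gather
lemma pvRowRead (bd : List (List Int)) (i r0 c0 chi : Int) :
    ∀ (n : Nat) (c : Int), (chi - c).toNat = n →
    ∀ (bs ws : List Int) (b : Bool), b = decide (PySem.Int.mod (i + c - r0 - c0) 2 = 0) →
    (pvA_readRow bd i c chi ((bs, ws), b)).1
      = (bs ++ ((PySem.List.pyRange c chi 1).filter
            (fun j => decide (PySem.Int.mod (i + j - r0 - c0) 2 = 0))).map
            (fun j => pvGetCell bd i j),
         ws ++ ((PySem.List.pyRange c chi 1).filter
            (fun j => decide (PySem.Int.mod (i + j - r0 - c0) 2 = 1))).map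
            (fun j => pvGetCell bd i j)) := by
  intro n
  induction n with
  | zero =>
    intro c hc bs ws b hb
    have : chi ≤ c := by omega
    simp [pvA_readRow, PySem.List.pyRange_one_eq_nil this]
  | succ m ih =>
    intro c hc bs ws b hb
    have hlt : c < chi := by omega
    have hflip : (!b) = decide (PySem.Int.mod (i + (c + 1) - r0 - c0) 2 = 0) := by
      rw [hb, show i + (c + 1) - r0 - c0 = (i + c - r0 - c0) + 1 from by ring]
      exact pvFlip _
    rw [pvA_readRow, PySem.List.pyRange_one_cons hlt, List.foldl_cons]
    by_cases hp : PySem.Int.mod (i + c - r0 - c0) 2 = 0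
    · have hp1 : ¬ PySem.Int.mod (i + c - r0 - c0) 2 = 1 := by
        rw [pvMod2_one_iff]; exact not_not_intro hp
      have hb' : b = true := by rw [hb]; exact decide_eq_true hp
      subst hb'
      have hIH := ih (c + 1) (by omega) (bs ++ [pvGetCell bd i c]) ws false
        (by rw [show (false : Bool) = !true from rfl, hflip])
      rw [pvA_readRow] at hIH
      rw [show pvA_readStep bd i ((bs, ws), true) c
            = ((bs ++ [pvGetCell bd i c], ws), false) from rfl, hIH]
      simp only [List.filter_cons, decide_eq_true hp, decide_eq_false hp1, if_true,
        Bool.false_eq_true, if_false, List.map_cons, List.append_assoc, List.cons_append,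
        List.nil_append]
    · have hp1 : PySem.Int.mod (i + c - r0 - c0) 2 = 1 := (pvMod2_one_iff _).mpr hp
      have hb' : b = false := by rw [hb]; exact decide_eq_false hp
      subst hb'
      have hIH := ih (c + 1) (by omega) bs (ws ++ [pvGetCell bd i c]) true
        (by rw [show (true : Bool) = !false from rfl, hflip])
      rw [pvA_readRow] at hIH
      rw [show pvA_readStep bd i ((bs, ws), false) c
            = ((bs, ws ++ [pvGetCell bd i c]), true) from rfl, hIH]
      simp only [List.filter_cons, decide_eq_true hp1, decide_eq_false hp, if_true,
        Bool.false_eq_true, if_false, List.map_cons, List.append_assoc, List.cons_append,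
        List.nil_append]

-- second pass, one row: A pops minima from its heaps exactly where M consumes the heads of
-- its (once-)sorted lists; invariant: M's lists are the sorted images of A's heaps
lemma pvRowWrite (i r0 c0 chi : Int) :
    ∀ (n : Nat) (c : Int), (chi - c).toNat = n →
    ∀ (bd : List (List Int)) (hb hw : List Int) (b : Bool),
      b = decide (PySem.Int.mod (i + c - r0 - c0) 2 = 0) →
    (pvA_writeRow i c chi ((bd, hb, hw), b)).1.1
      = ((PySem.List.pyRange c chi 1).foldl (pvM_assignStep i r0 c0)
          (bd, PySem.List.sorted hb (fun x => x) false,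
               PySem.List.sorted hw (fun x => x) false)).1
    ∧ PySem.List.sorted (pvA_writeRow i c chi ((bd, hb, hw), b)).1.2.1 (fun x => x) false
      = ((PySem.List.pyRange c chi 1).foldl (pvM_assignStep i r0 c0)
          (bd, PySem.List.sorted hb (fun x => x) false,
               PySem.List.sorted hw (fun x => x) false)).2.1
    ∧ PySem.List.sorted (pvA_writeRow i c chi ((bd, hb, hw), b)).1.2.2 (fun x => x) false
      = ((PySem.List.pyRange c chi 1).foldl (pvM_assignStep i r0 c0)
          (bd, PySem.List.sorted hb (fun x => x) false,
               PySem.List.sorted hw (fun x => x) false)).2.2 := by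
  intro n
  induction n with
  | zero =>
    intro c hc bd hb hw b hb'
    have : chi ≤ c := by omega
    simp [pvA_writeRow, PySem.List.pyRange_one_eq_nil this]
  | succ m ih =>
    intro c hc bd hb hw b hbb
    have hlt : c < chi := by omega
    have hflip : (!b) = decide (PySem.Int.mod (i + (c + 1) - r0 - c0) 2 = 0) := by
      rw [hbb, show i + (c + 1) - r0 - c0 = (i + c - r0 - c0) + 1 from by ring]
      exact pvFlip _
    rw [pvA_writeRow, PySem.List.pyRange_one_cons hlt, List.foldl_cons, List.foldl_cons]
    by_cases hp : PySem.Int.mod (i + c - r0 - c0) 2 = 0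
    · have hb' : b = true := by rw [hbb]; exact decide_eq_true hp
      subst hb'
      have hhead : (PySem.List.sorted hb (fun x => x) false).headD 0 = (pvHeappop hb).1 := by
        by_cases hhb : hb = []
        · subst hhb; rfl
        · rw [pvSorted_heappop hb hhb]; rfl
      have htail : (PySem.List.sorted hb (fun x => x) false).tail
          = PySem.List.sorted (pvHeappop hb).2 (fun x => x) false := by
        by_cases hhb : hb = []
        · subst hhb; rfl
        · rw [pvSorted_heappop hb hhb]; rfl
      rw [show pvA_writeStep i ((bd, hb, hw), true) c
            = ((pvSetCell bd i c (pvHeappop hb).1, (pvHeappop hb).2, hw), false) from rfl,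
          show pvM_assignStep i r0 c0
              (bd, PySem.List.sorted hb (fun x => x) false,
               PySem.List.sorted hw (fun x => x) false) c
            = (pvSetCell bd i c (pvHeappop hb).1,
               PySem.List.sorted (pvHeappop hb).2 (fun x => x) false,
               PySem.List.sorted hw (fun x => x) false) from by
            rw [pvM_assignStep, if_pos hp, hhead, htail]]
      have hIH := ih (c + 1) (by omega) (pvSetCell bd i c (pvHeappop hb).1)
        (pvHeappop hb).2 hw false (by rw [show (false : Bool) = !true from rfl, hflip])
      rw [pvA_writeRow] at hIH
      exact hIH
    · have hb' : b = false := by rw [hbb]; exact decide_eq_false hp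
      subst hb'
      have hhead : (PySem.List.sorted hw (fun x => x) false).headD 0 = (pvHeappop hw).1 := by
        by_cases hhw : hw = []
        · subst hhw; rfl
        · rw [pvSorted_heappop hw hhw]; rfl
      have htail : (PySem.List.sorted hw (fun x => x) false).tail
          = PySem.List.sorted (pvHeappop hw).2 (fun x => x) false := by
        by_cases hhw : hw = []
        · subst hhw; rfl
        · rw [pvSorted_heappop hw hhw]; rfl
      rw [show pvA_writeStep i ((bd, hb, hw), false) c
            = ((pvSetCell bd i c (pvHeappop hw).1, hb, (pvHeappop hw).2), true) from rfl,
          show pvM_assignStep i r0 c0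
              (bd, PySem.List.sorted hb (fun x => x) false,
               PySem.List.sorted hw (fun x => x) false) c
            = (pvSetCell bd i c (pvHeappop hw).1,
               PySem.List.sorted hb (fun x => x) false,
               PySem.List.sorted (pvHeappop hw).2 (fun x => x) false) from by
            rw [pvM_assignStep, if_neg hp, hhead, htail]]
      have hIH := ih (c + 1) (by omega) (pvSetCell bd i c (pvHeappop hw).1)
        hb (pvHeappop hw).2 true (by rw [show (true : Bool) = !false from rfl, hflip])
      rw [pvA_writeRow] at hIH
      exact hIH

-- first pass, all rows
lemma pvOuterRead (bd : List (List Int)) (r0 c0 rhi chi : Int) :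
    ∀ (n : Nat) (r : Int), (rhi - r).toNat = n →
    ∀ (bs ws : List Int) (b : Bool), b = decide (PySem.Int.mod (r - r0) 2 = 0) →
    ((PySem.List.pyRange r rhi 1).foldl (pvA_readRows bd c0 chi) ((bs, ws), b)).1
      = (bs ++ (PySem.List.pyRange r rhi 1).flatMap (fun i =>
            ((PySem.List.pyRange c0 chi 1).filter
                (fun j => decide (PySem.Int.mod (i + j - r0 - c0) 2 = 0))).map
              (fun j => pvGetCell bd i j)),
         ws ++ (PySem.List.pyRange r rhi 1).flatMap (fun i =>
            ((PySem.List.pyRange c0 chi 1).filter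
                (fun j => decide (PySem.Int.mod (i + j - r0 - c0) 2 = 1))).map
              (fun j => pvGetCell bd i j))) := by
  intro n
  induction n with
  | zero =>
    intro r hr bs ws b hb
    have : rhi ≤ r := by omega
    simp [PySem.List.pyRange_one_eq_nil this]
  | succ m ih =>
    intro r hr bs ws b hb
    have hlt : r < rhi := by omega
    have hrow : b = decide (PySem.Int.mod (r + c0 - r0 - c0) 2 = 0) := by
      rw [hb, show r + c0 - r0 - c0 = r - r0 from by ring]
    have hflip : (!b) = decide (PySem.Int.mod ((r + 1) - r0) 2 = 0) := by
      rw [hb, show (r + 1) - r0 = (r - r0) + 1 from by ring]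
      exact pvFlip _
    rw [PySem.List.pyRange_one_cons hlt, List.foldl_cons, List.flatMap_cons, List.flatMap_cons]
    have hrowread := pvRowRead bd r r0 c0 chi (chi - c0).toNat c0 rfl bs ws b hrow
    rw [show pvA_readRows bd c0 chi ((bs, ws), b) r
          = ((pvA_readRow bd r c0 chi ((bs, ws), b)).1, !b) from rfl, hrowread,
        ih (r + 1) (by omega) _ _ (!b) hflip]
    simp [List.append_assoc]

-- second pass, all rows
lemma pvOuterWrite (r0 c0 rhi chi : Int) :
    ∀ (n : Nat) (r : Int), (rhi - r).toNat = n →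
    ∀ (bd : List (List Int)) (hb hw : List Int) (b : Bool),
      b = decide (PySem.Int.mod (r - r0) 2 = 0) →
    ((PySem.List.pyRange r rhi 1).foldl (pvA_writeRows c0 chi) ((bd, hb, hw), b)).1.1
      = ((PySem.List.pyRange r rhi 1).foldl (pvM_assignRows r0 c0 chi)
          (bd, PySem.List.sorted hb (fun x => x) false,
               PySem.List.sorted hw (fun x => x) false)).1
    ∧ PySem.List.sorted ((PySem.List.pyRange r rhi 1).foldl (pvA_writeRows c0 chi)
          ((bd, hb, hw), b)).1.2.1 (fun x => x) false
      = ((PySem.List.pyRange r rhi 1).foldl (pvM_assignRows r0 c0 chi)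
          (bd, PySem.List.sorted hb (fun x => x) false,
               PySem.List.sorted hw (fun x => x) false)).2.1
    ∧ PySem.List.sorted ((PySem.List.pyRange r rhi 1).foldl (pvA_writeRows c0 chi)
          ((bd, hb, hw), b)).1.2.2 (fun x => x) false
      = ((PySem.List.pyRange r rhi 1).foldl (pvM_assignRows r0 c0 chi)
          (bd, PySem.List.sorted hb (fun x => x) false,
               PySem.List.sorted hw (fun x => x) false)).2.2 := by
  intro n
  induction n with
  | zero =>
    intro r hr bd hb hw b hb'
    have : rhi ≤ r := by omega
    simp [PySem.List.pyRange_one_eq_nil this]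
  | succ m ih =>
    intro r hr bd hb hw b hbb
    have hlt : r < rhi := by omega
    have hrow : b = decide (PySem.Int.mod (r + c0 - r0 - c0) 2 = 0) := by
      rw [hbb, show r + c0 - r0 - c0 = r - r0 from by ring]
    have hflip : (!b) = decide (PySem.Int.mod ((r + 1) - r0) 2 = 0) := by
      rw [hbb, show (r + 1) - r0 = (r - r0) + 1 from by ring]
      exact pvFlip _
    obtain ⟨h1, h2, h3⟩ :=
      pvRowWrite r r0 c0 chi (chi - c0).toNat c0 rfl bd hb hw b hrow
    rw [PySem.List.pyRange_one_cons hlt, List.foldl_cons, List.foldl_cons]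
    rw [show pvA_writeRows c0 chi ((bd, hb, hw), b) r
          = ((pvA_writeRow r c0 chi ((bd, hb, hw), b)).1, !b) from rfl,
        show pvM_assignRows r0 c0 chi
            (bd, PySem.List.sorted hb (fun x => x) false,
             PySem.List.sorted hw (fun x => x) false) r
          = (PySem.List.pyRange c0 chi 1).foldl (pvM_assignStep r r0 c0)
              (bd, PySem.List.sorted hb (fun x => x) false,
               PySem.List.sorted hw (fun x => x) false) from rfl]
    have hIH := ih (r + 1) (by omega) (pvA_writeRow r c0 chi ((bd, hb, hw), b)).1.1
      (pvA_writeRow r c0 chi ((bd, hb, hw), b)).1.2.1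
      (pvA_writeRow r c0 chi ((bd, hb, hw), b)).1.2.2 (!b) hflip
    rw [h2, h3] at hIH
    have hst : ((pvA_writeRow r c0 chi ((bd, hb, hw), b)).1.1,
        (pvA_writeRow r c0 chi ((bd, hb, hw), b)).1.2.1,
        (pvA_writeRow r c0 chi ((bd, hb, hw), b)).1.2.2)
        = (pvA_writeRow r c0 chi ((bd, hb, hw), b)).1 := rfl
    rw [hst, h1] at hIH
    have heta : (((PySem.List.pyRange c0 chi 1).foldl (pvM_assignStep r r0 c0)
          (bd, PySem.List.sorted hb (fun x => x) false,
           PySem.List.sorted hw (fun x => x) false)).1,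
        ((PySem.List.pyRange c0 chi 1).foldl (pvM_assignStep r r0 c0)
          (bd, PySem.List.sorted hb (fun x => x) false,
           PySem.List.sorted hw (fun x => x) false)).2.1,
        ((PySem.List.pyRange c0 chi 1).foldl (pvM_assignStep r r0 c0)
          (bd, PySem.List.sorted hb (fun x => x) false,
           PySem.List.sorted hw (fun x => x) false)).2.2)
        = (PySem.List.pyRange c0 chi 1).foldl (pvM_assignStep r r0 c0)
          (bd, PySem.List.sorted hb (fun x => x) false,
           PySem.List.sorted hw (fun x => x) false) := rfl
    rw [heta] at hIH
    exact hIH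

-- A's query equals the middle form M
lemma pvQuery_eqAM (bd : List (List Int)) (q : List Int) :
    pvA_query bd q = pvM_query bd q := by
  simp only [pvA_query, pvM_query, pvA_read, pvA_write, pvM_gather]
  set r0 := PySem.List.pyGetD q 0 0 with hr0
  set c0 := PySem.List.pyGetD q 1 0 with hc0
  set w := PySem.List.pyGetD q 2 0 with hw0
  have h00 : (true : Bool) = decide (PySem.Int.mod (r0 - r0) 2 = 0) := by
    rw [show r0 - r0 = 0 from by ring]; rfl
  have hread := pvOuterRead bd r0 c0 (r0 + w) (c0 + w) ((r0 + w) - r0).toNat r0 rfl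
    [] [] true h00
  rw [hread]
  simp only [List.nil_append]
  exact (pvOuterWrite r0 c0 (r0 + w) (c0 + w) ((r0 + w) - r0).toNat r0 rfl bd _ _
    true h00).1


-- ---- from the middle form M to B: positions instead of value streams ----

-- generic cell step: M's per-cell assignment as a function of the cell pair
def pvStep (r0 c0 : Int) (s : List (List Int) × List Int × List Int)
    (p : Int × Int) : List (List Int) × List Int × List Int :=
  pvM_assignStep p.1 r0 c0 s p.2

-- the interleaved assignment stream: which (cell, value) pair M writes, in M's order
def pvMerge (r0 c0 : Int) : List (Int × Int) → List Int → List Int → List ((Int × Int) × Int)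
  | [], _, _ => []
  | p :: t, bs, ws =>
    if PySem.Int.mod (p.1 + p.2 - r0 - c0) 2 = 0 then
      (p, bs.headD 0) :: pvMerge r0 c0 t bs.tail ws
    else
      (p, ws.headD 0) :: pvMerge r0 c0 t bs ws.tail

-- the single write B performs for one (slot, value) pair
def pvWrite (b : List (List Int)) (pv : (Int × Int) × Int) : List (List Int) :=
  pvSetCell b pv.1.1 pv.1.2 pv.2

lemma pvColour01 (r0 c0 : Int) (p : Int × Int) :
    pvB_colour r0 c0 p = 0 ∨ pvB_colour r0 c0 p = 1 := by
  simp only [pvB_colour, PySem.Int.mod_eq_emod_of_pos (show (0:Int) < 2 by omega)]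
  omega

-- insertBy walks past a prefix it does not insert into
lemma pvInsertBy_prefix (before : (Int × Int) → (Int × Int) → Bool) (x : Int × Int) :
    ∀ (zs os : List (Int × Int)), (∀ z ∈ zs, before x z = false) →
    PySem.List.insertBy before x (zs ++ os) = zs ++ PySem.List.insertBy before x os := by
  intro zs
  induction zs with
  | nil => intro os _; simp
  | cons z t ih =>
    intro os h
    have hz : before x z = false := h z (by simp)
    simp only [List.cons_append, PySem.List.insertBy, hz, Bool.false_eq_true, if_false]
    rw [ih os (fun y hy => h y (by simp [hy]))]

-- stable sort by a {0,1}-valued key = the 0-block then the 1-block, each in input order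
lemma pvFoldIns (c : (Int × Int) → Int) :
    ∀ (xs zs os : List (Int × Int)),
      (∀ x ∈ xs, c x = 0 ∨ c x = 1) → (∀ z ∈ zs, c z = 0) → (∀ o ∈ os, c o = 1) →
    xs.foldl (fun acc x => PySem.List.insertBy (fun a b => decide (c a < c b)) x acc) (zs ++ os)
      = (zs ++ xs.filter (fun x => decide (c x = 0)))
        ++ (os ++ xs.filter (fun x => !decide (c x = 0))) := by
  intro xs
  induction xs with
  | nil => intro zs os _ _ _; simp
  | cons x t ih =>
    intro zs os hx hz ho
    have hx01 := hx x (by simp)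
    simp only [List.foldl_cons, List.filter_cons]
    rcases hx01 with h0 | h1
    · have hpre : ∀ z ∈ zs, (fun a b => decide (c a < c b)) x z = false := by
        intro z hzz; simp [hz z hzz, h0]
      have hins : PySem.List.insertBy (fun a b => decide (c a < c b)) x os = x :: os := by
        cases os with
        | nil => simp [PySem.List.insertBy]
        | cons o os' =>
          have : c o = 1 := ho o (by simp)
          simp [PySem.List.insertBy, this, h0]
      rw [pvInsertBy_prefix _ _ zs os hpre, hins,
        show zs ++ x :: os = (zs ++ [x]) ++ os from by simp,
        ih (zs ++ [x]) os (fun y hy => hx y (by simp [hy]))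
          (by intro z hzz; rcases List.mem_append.mp hzz with h | h
              · exact hz z h
              · simp at h; simpa [h] using h0) ho]
      simp [h0]
    · have hall : ∀ z ∈ zs ++ os, (fun a b => decide (c a < c b)) x z = false := by
        intro z hzz
        rcases List.mem_append.mp hzz with h | h
        · simp [hz z h, h1]
        · simp [ho z h, h1]
      rw [PySem.List.insertBy_of_forall_not_before _ _ _ hall,
        show (zs ++ os) ++ [x] = zs ++ (os ++ [x]) from by simp,
        ih zs (os ++ [x]) (fun y hy => hx y (by simp [hy])) hz
          (by intro o hoo; rcases List.mem_append.mp hoo with h | h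
              · exact ho o h
              · simp at h; simpa [h] using h1)]
      have : c x ≠ 0 := by omega
      simp [this]

lemma pvSortedBinary (c : (Int × Int) → Int) (xs : List (Int × Int))
    (h : ∀ x ∈ xs, c x = 0 ∨ c x = 1) :
    PySem.List.sorted xs c false
      = xs.filter (fun x => decide (c x = 0)) ++ xs.filter (fun x => !decide (c x = 0)) := by
  rw [PySem.List.sorted_eq_foldl_insertBy]
  have := pvFoldIns c xs [] [] h (by simp) (by simp)
  simpa using this

-- fold over a flatMap = nested fold
lemma pvFoldl_flatMap {σ τ : Type} (f : σ → τ → σ) (g : Int → List τ) :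
    ∀ (l : List Int) (s : σ),
    (l.flatMap g).foldl f s = l.foldl (fun s i => (g i).foldl f s) s := by
  intro l
  induction l with
  | nil => intro s; rfl
  | cons i t ih => intro s; simp only [List.flatMap_cons, List.foldl_append, List.foldl_cons, ih]

-- M's nested row/column assignment loops, as one fold over the row-major cell list
lemma pvNested_eq_cells (r0 c0 w : Int) (st : List (List Int) × List Int × List Int) :
    (PySem.List.pyRange r0 (r0 + w) 1).foldl (pvM_assignRows r0 c0 (c0 + w)) st
      = (pvB_cells r0 c0 w).foldl (pvStep r0 c0) st := by
  rw [pvB_cells, pvFoldl_flatMap]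
  have hfun : pvM_assignRows r0 c0 (c0 + w)
      = fun s i => ((PySem.List.pyRange c0 (c0 + w) 1).map (fun j => (i, j))).foldl
          (pvStep r0 c0) s := by
    funext s i
    rw [List.foldl_map]
    rfl
  rw [hfun]

lemma pvMerge_map_fst (r0 c0 : Int) :
    ∀ (ps : List (Int × Int)) (bs ws : List Int),
    (pvMerge r0 c0 ps bs ws).map Prod.fst = ps := by
  intro ps
  induction ps with
  | nil => intro bs ws; rfl
  | cons p t ih =>
    intro bs ws
    by_cases hp : PySem.Int.mod (p.1 + p.2 - r0 - c0) 2 = 0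
    · simp only [pvMerge, if_pos hp, List.map_cons, ih]
    · simp only [pvMerge, if_neg hp, List.map_cons, ih]

-- M's stateful cell fold = a plain fold of writes over the merge stream
lemma pvAssignList (r0 c0 : Int) :
    ∀ (ps : List (Int × Int)) (bd : List (List Int)) (bs ws : List Int),
    ps.foldl (pvStep r0 c0) (bd, bs, ws)
      = ((pvMerge r0 c0 ps bs ws).foldl pvWrite bd,
         bs.drop (ps.countP (fun p => decide (pvB_colour r0 c0 p = 0))),
         ws.drop (ps.countP (fun p => !decide (pvB_colour r0 c0 p = 0)))) := by
  intro ps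
  induction ps with
  | nil => intro bd bs ws; simp [pvMerge]
  | cons p t ih =>
    intro bd bs ws
    by_cases hp : PySem.Int.mod (p.1 + p.2 - r0 - c0) 2 = 0
    · have hc : pvB_colour r0 c0 p = 0 := hp
      simp only [List.foldl_cons, pvMerge, if_pos hp, List.countP_cons]
      rw [show pvStep r0 c0 (bd, bs, ws) p
            = (pvSetCell bd p.1 p.2 (bs.headD 0), bs.tail, ws) from by
          simp only [pvStep, pvM_assignStep, if_pos hp]]
      rw [ih]
      simp only [pvWrite, hc, decide_true, Bool.not_true, if_true,
        Bool.false_eq_true, if_false, Nat.add_zero, List.drop_tail]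
    · have hc : ¬ pvB_colour r0 c0 p = 0 := hp
      simp only [List.foldl_cons, pvMerge, if_neg hp, List.countP_cons]
      rw [show pvStep r0 c0 (bd, bs, ws) p
            = (pvSetCell bd p.1 p.2 (ws.headD 0), bs, ws.tail) from by
          simp only [pvStep, pvM_assignStep, if_neg hp]]
      rw [ih]
      simp only [pvWrite, hc, decide_false, Bool.not_false, if_true,
        Bool.false_eq_true, if_false, Nat.add_zero, List.drop_tail]

-- the merge stream is a permutation of "black writes then white writes"
lemma pvMerge_perm (r0 c0 : Int) :
    ∀ (ps : List (Int × Int)) (bs ws : List Int),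
      bs.length = ps.countP (fun p => decide (pvB_colour r0 c0 p = 0)) →
      ws.length = ps.countP (fun p => !decide (pvB_colour r0 c0 p = 0)) →
    (pvMerge r0 c0 ps bs ws).Perm
      ((ps.filter (fun p => decide (pvB_colour r0 c0 p = 0))).zip bs
        ++ (ps.filter (fun p => !decide (pvB_colour r0 c0 p = 0))).zip ws) := by
  intro ps
  induction ps with
  | nil => intro bs ws _ _; simp [pvMerge]
  | cons p t ih =>
    intro bs ws hb hw
    by_cases hp : PySem.Int.mod (p.1 + p.2 - r0 - c0) 2 = 0
    · have hc : pvB_colour r0 c0 p = 0 := hp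
      rw [List.countP_cons] at hb hw
      simp only [hc, decide_true, Bool.not_true, if_true, Bool.false_eq_true, if_false,
        Nat.add_zero] at hb hw
      cases bs with
      | nil => simp at hb
      | cons bv bs' =>
        simp only [pvMerge, if_pos hp, List.filter_cons, hc, decide_true, Bool.not_true,
          if_true, Bool.false_eq_true, if_false, List.zip_cons_cons, List.cons_append,
          List.tail_cons, List.headD_cons]
        exact List.Perm.cons _ (ih bs' ws (by simpa using hb) hw)
    · have hc : ¬ pvB_colour r0 c0 p = 0 := hp
      rw [List.countP_cons] at hb hw
      simp only [hc, decide_false, Bool.not_false, if_true, Bool.false_eq_true, if_false,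
        Nat.add_zero] at hb hw
      cases ws with
      | nil => simp at hw
      | cons wv ws' =>
        simp only [pvMerge, if_neg hp, List.filter_cons, hc, decide_false, Bool.not_false,
          if_true, Bool.false_eq_true, if_false, List.zip_cons_cons, List.tail_cons,
          List.headD_cons]
        exact (List.Perm.cons _ (ih bs ws' hb (by simpa using hw))).trans
          List.perm_middle.symm

-- Python's resolved (wraparound) index, and pySetD/pyGetD on an in-range index
def pvRes (n : Nat) (i : Int) : Nat := if 0 ≤ i then i.toNat else n - (-i).toNat

lemma pvRes_lt (n : Nat) (i : Int) (h1 : -(n : Int) ≤ i) (h2 : i < (n : Int)) :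
    pvRes n i < n := by
  simp only [pvRes]; split_ifs <;> omega

lemma pvIdx?_in (n : Nat) (i : Int) (h1 : -(n : Int) ≤ i) (h2 : i < (n : Int)) :
    PySem.List.pyIdx? n i = some (pvRes n i) := by
  simp only [PySem.List.pyIdx?, pvRes]
  split_ifs <;> rfl

lemma pvSetD_in {α : Type} (xs : List α) (i : Int) (v : α)
    (h1 : -(xs.length : Int) ≤ i) (h2 : i < (xs.length : Int)) :
    PySem.List.pySetD xs i v = xs.set (pvRes xs.length i) v := by
  simp only [PySem.List.pySetD, PySem.List.pySet?, pvIdx?_in xs.length i h1 h2,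
    Option.map_some, Option.getD_some]

lemma pvSetD_out {α : Type} (xs : List α) (i : Int) (v : α)
    (h : i < -(xs.length : Int) ∨ (xs.length : Int) ≤ i) :
    PySem.List.pySetD xs i v = xs := by
  simp only [PySem.List.pySetD, PySem.List.pySet?, PySem.List.pyIdx?]
  split_ifs <;> first | rfl | omega

lemma pvGetD_in {α : Type} (xs : List α) (i : Int) (d : α)
    (h1 : -(xs.length : Int) ≤ i) (_h2 : i < (xs.length : Int)) :
    PySem.List.pyGetD xs i d = xs.getD (pvRes xs.length i) d := by
  by_cases h0 : 0 ≤ i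
  · rw [PySem.List.pyGetD_of_nonneg _ _ h0]
    simp [pvRes, h0]
  · rw [show pvRes xs.length i = xs.length - (-i).toNat from by simp [pvRes, h0]]
    have hpy := PySem.List.pyGetD_neg_natCast xs (-i).toNat d (by omega) (by omega)
    rw [show -(((-i).toNat : Nat) : Int) = i from by omega] at hpy
    rw [hpy, List.getD_eq_getElem _ _ (by omega)]

-- two in-range indices of one window (of width ≤ the list length) resolve to distinct cells
lemma pvRes_ne (n : Nat) (lo wdt i i' : Int) (hw : wdt ≤ (n : Int))
    (hlo : -(n : Int) ≤ lo) (_hhi : lo + wdt ≤ (n : Int))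
    (hi1 : lo ≤ i) (hi2 : i < lo + wdt) (hi1' : lo ≤ i') (hi2' : i' < lo + wdt)
    (hne : i ≠ i') : pvRes n i ≠ pvRes n i' := by
  simp only [pvRes]; split_ifs <;> omega

-- writes to distinct physical cells commute
lemma pvSetCell_comm2 (b : List (List Int)) (i j i' j' v v' : Int)
    (hiR : -(b.length : Int) ≤ i ∧ i < (b.length : Int))
    (hiR' : -(b.length : Int) ≤ i' ∧ i' < (b.length : Int))
    (hsep : pvRes b.length i ≠ pvRes b.length i'
      ∨ (i = i'
         ∧ -(((PySem.List.pyGetD b i []).length : Int)) ≤ j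
         ∧ j < ((PySem.List.pyGetD b i []).length : Int)
         ∧ -(((PySem.List.pyGetD b i []).length : Int)) ≤ j'
         ∧ j' < ((PySem.List.pyGetD b i []).length : Int)
         ∧ pvRes (PySem.List.pyGetD b i []).length j
             ≠ pvRes (PySem.List.pyGetD b i []).length j')) :
    pvSetCell (pvSetCell b i j v) i' j' v' = pvSetCell (pvSetCell b i' j' v') i j v := by
  rcases hsep with hmm | ⟨rfl, hj1, hj2, hj1', hj2', hjj⟩
  · -- distinct rows
    simp only [pvSetCell]
    rw [pvGetD_in b i [] hiR.1 hiR.2, pvGetD_in b i' [] hiR'.1 hiR'.2,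
        pvSetD_in b i _ hiR.1 hiR.2, pvSetD_in b i' _ hiR'.1 hiR'.2]
    rw [pvGetD_in _ i' [] (by simpa using hiR'.1) (by simpa using hiR'.2),
        pvSetD_in _ i' _ (by simpa using hiR'.1) (by simpa using hiR'.2),
        pvGetD_in _ i [] (by simpa using hiR.1) (by simpa using hiR.2),
        pvSetD_in _ i _ (by simpa using hiR.1) (by simpa using hiR.2)]
    simp only [List.length_set]
    have hget1 : (b.set (pvRes b.length i) (PySem.List.pySetD (b.getD (pvRes b.length i) []) j v)).getD
        (pvRes b.length i') [] = b.getD (pvRes b.length i') [] := by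
      rw [List.getD_eq_getElem?_getD, List.getElem?_set_ne hmm, ← List.getD_eq_getElem?_getD]
    have hget2 : (b.set (pvRes b.length i') (PySem.List.pySetD (b.getD (pvRes b.length i') []) j' v')).getD
        (pvRes b.length i) [] = b.getD (pvRes b.length i) [] := by
      rw [List.getD_eq_getElem?_getD, List.getElem?_set_ne (Ne.symm hmm),
        ← List.getD_eq_getElem?_getD]
    rw [hget1, hget2, List.set_comm _ _ hmm]
  · -- same row, distinct columns
    simp only [pvSetCell]
    have hm := pvRes_lt b.length i hiR.1 hiR.2
    rw [pvGetD_in b i [] hiR.1 hiR.2] at hj1 hj2 hj1' hj2' hjj ⊢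
    have hset : ∀ (R : List Int), PySem.List.pySetD b i R = b.set (pvRes b.length i) R :=
      fun R => pvSetD_in b i R hiR.1 hiR.2
    have hset2 : ∀ (R R' : List Int),
        PySem.List.pySetD (b.set (pvRes b.length i) R) i R'
          = (b.set (pvRes b.length i) R).set (pvRes b.length i) R' := by
      intro R R'
      rw [pvSetD_in _ i R' (by simpa using hiR.1) (by simpa using hiR.2)]
      simp only [List.length_set]
    have hget2 : ∀ (R : List Int),
        PySem.List.pyGetD (b.set (pvRes b.length i) R) i [] = R := by
      intro R
      rw [pvGetD_in _ i [] (by simpa using hiR.1) (by simpa using hiR.2)]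
      simp only [List.length_set]
      rw [List.getD_eq_getElem?_getD, List.getElem?_set_self (by simpa using hm)]
      rfl
    have hrow : ∀ (ys : List Int), ys.length = (b.getD (pvRes b.length i) []).length →
        ∀ (jj : Int) (vv : Int),
          -(((b.getD (pvRes b.length i) []).length : Int)) ≤ jj →
          jj < ((b.getD (pvRes b.length i) []).length : Int) →
        PySem.List.pySetD ys jj vv
          = ys.set (pvRes (b.getD (pvRes b.length i) []).length jj) vv := by
      intro ys hys jj vv hb1 hb2
      rw [pvSetD_in ys jj vv (by omega) (by omega), hys]
    rw [hset, hset, hset2, hset2, hget2, hget2, List.set_set, List.set_set]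
    rw [hrow _ rfl j v hj1 hj2, hrow _ rfl j' v' hj1' hj2',
        hrow _ (by simp) j' v' hj1' hj2', hrow _ (by simp) j v hj1 hj2,
        List.set_comm _ _ hjj]

lemma pvRange_pairwise_lt (a b : Int) :
    (PySem.List.pyRange a b 1).Pairwise (· < ·) := by
  generalize hn : (b - a).toNat = n
  induction n generalizing a with
  | zero =>
    rw [PySem.List.pyRange_one_eq_nil (by omega)]
    exact List.Pairwise.nil
  | succ m ih =>
    rw [PySem.List.pyRange_one_cons (by omega : a < b)]
    refine List.Pairwise.cons ?_ (ih (a + 1) (by omega))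
    intro x hx
    have := PySem.List.mem_pyRange_one.mp hx
    omega

lemma pvCells_nodup (r0 c0 w : Int) : (pvB_cells r0 c0 w).Nodup := by
  rw [pvB_cells, List.nodup_flatMap]
  constructor
  · intro i _
    refine List.Nodup.map (fun x y hxy => ?_)
      ((pvRange_pairwise_lt c0 (c0 + w)).imp (fun h => ne_of_lt h))
    exact (Prod.mk.injEq _ _ _ _).mp hxy |>.2
  · refine (pvRange_pairwise_lt r0 (r0 + w)).imp ?_
    intro i i' hlt x hx hx'
    simp only [List.mem_map] at hx hx'
    obtain ⟨j, _, rfl⟩ := hx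
    obtain ⟨j', _, hj'⟩ := hx'
    have : i' = i := ((Prod.mk.injEq _ _ _ _).mp hj').1
    omega

-- gather = filter the cell list by colour, then read
lemma pvGather_eq (bd : List (List Int)) (r0 c0 w p : Int) :
    pvM_gather bd r0 c0 (r0 + w) (c0 + w) p
      = ((pvB_cells r0 c0 w).filter (fun x => decide (pvB_colour r0 c0 x = p))).map
          (fun x => pvGetCell bd x.1 x.2) := by
  rw [pvM_gather, pvB_cells, List.filter_flatMap, List.map_flatMap]
  refine List.flatMap_congr fun i _ => ?_
  rw [List.filter_map, List.map_map]
  rfl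

-- the values of a colour class of the value-sorted cell list are that class's sorted values
lemma pvVals_eq (bd : List (List Int)) (cells : List (Int × Int))
    (c : (Int × Int) → Bool) :
    (((PySem.List.sorted cells (fun p => pvGetCell bd p.1 p.2) false).filter c).map
        (fun p => pvGetCell bd p.1 p.2))
      = PySem.List.sorted ((cells.filter c).map (fun p => pvGetCell bd p.1 p.2))
          (fun x => x) false := by
  refine (PySem.List.sorted_id_eq_of_perm_of_pairwise _ _ ?_ ?_).symm
  · exact List.Perm.map _ (List.Perm.filter c
      (PySem.List.sorted_perm cells (fun p => pvGetCell bd p.1 p.2) false))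
  · refine List.pairwise_map.mpr ?_
    exact List.Pairwise.sublist List.filter_sublist
      (PySem.List.sorted_pairwise cells (fun p => pvGetCell bd p.1 p.2))

-- one query: the middle form equals B (under the per-query precondition)
lemma pvSetCell_shape (b : List (List Int)) (i j v : Int) :
    (pvSetCell b i j v).map List.length = b.map List.length := by
  by_cases hin : -(b.length : Int) ≤ i ∧ i < (b.length : Int)
  · simp only [pvSetCell]
    rw [pvSetD_in _ _ _ hin.1 hin.2, pvGetD_in _ _ _ hin.1 hin.2]
    have hm := pvRes_lt b.length i hin.1 hin.2
    rw [List.map_set, PySem.List.length_pySetD, List.getD_eq_getElem _ _ hm]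
    have hg : (List.map List.length b)[pvRes b.length i]'(by simpa using hm)
        = b[pvRes b.length i].length := by simp
    rw [← hg, List.set_getElem_self]
  · simp only [pvSetCell]
    rw [pvSetD_out _ _ _ (by omega)]

lemma pvFoldWrite_shape :
    ∀ (l : List ((Int × Int) × Int)) (b : List (List Int)),
    (l.foldl (fun b pv => pvSetCell b pv.1.1 pv.1.2 pv.2) b).map List.length
      = b.map List.length := by
  intro l
  induction l with
  | nil => intro b; rfl
  | cons pv t ih =>
    intro b
    simp only [List.foldl_cons]
    rw [ih, pvSetCell_shape]

-- a fold of writes over a permuted write list is the same board, provided any two writes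
-- of the list commute on every board of the original shape (which every prefix preserves)
lemma pvFoldWrite_perm {l l' : List ((Int × Int) × Int)} (hperm : l.Perm l') (S : List Nat)
    (hcomm : ∀ b : List (List Int), b.map List.length = S →
      ∀ x ∈ l, ∀ y ∈ l, pvWrite (pvWrite b x) y = pvWrite (pvWrite b y) x) :
    ∀ b, b.map List.length = S → l.foldl pvWrite b = l'.foldl pvWrite b := by
  induction hperm with
  | nil => intro b _; rfl
  | cons x p ih =>
    intro b hb
    simp only [List.foldl_cons]
    exact ih (fun b' hb' u hu v hv => hcomm b' hb' u (by simp [hu]) v (by simp [hv]))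
      (pvWrite b x) (by rw [show pvWrite b x = pvSetCell b x.1.1 x.1.2 x.2 from rfl,
        pvSetCell_shape]; exact hb)
  | swap x y t =>
    intro b hb
    simp only [List.foldl_cons]
    rw [hcomm b hb y (by simp) x (by simp)]
  | trans p1 p2 ih1 ih2 =>
    intro b hb
    rw [ih1 hcomm b hb,
      ih2 (fun b' hb' u hu v hv =>
        hcomm b' hb' u (p1.mem_iff.mpr hu) v (p1.mem_iff.mpr hv)) b hb]

lemma pvB_query_shape (bd : List (List Int)) (q : List Int) :
    (pvB_query bd q).map List.length = bd.map List.length := by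
  simp only [pvB_query]
  exact pvFoldWrite_shape _ bd

lemma pvRowLenD (bd : List (List Int)) (m : Nat) :
    (bd.getD m []).length = (bd.map List.length).getD m 0 := by
  by_cases hm : m < bd.length
  · rw [List.getD_eq_getElem _ _ hm, List.getD_eq_getElem _ _ (by simpa using hm)]
    simp
  · rw [List.getD_eq_default _ _ (by omega), List.getD_eq_default _ _ (by simpa using
      (by omega : bd.length ≤ m))]
    rfl

lemma pvRowLen_eq (b bd : List (List Int)) (i : Int)
    (h : b.map List.length = bd.map List.length)
    (h1 : -(bd.length : Int) ≤ i) (h2 : i < (bd.length : Int)) :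
    (PySem.List.pyGetD b i []).length = (PySem.List.pyGetD bd i []).length := by
  have hL : b.length = bd.length := by
    have := congrArg List.length h
    simpa using this
  rw [pvGetD_in b i [] (by omega) (by omega), pvGetD_in bd i [] h1 h2, hL,
    pvRowLenD, pvRowLenD, h]

lemma pvPreQ_transfer (bd bd' : List (List Int)) (q : List Int)
    (h : bd.map List.length = bd'.map List.length) : pvPreQ bd q → pvPreQ bd' q := by
  intro ⟨hq3, hrest⟩
  refine ⟨hq3, ?_⟩
  have hL : bd.length = bd'.length := by
    have := congrArg List.length h
    simpa using this
  have hLZ : (bd.length : Int) = (bd'.length : Int) := by exact_mod_cast hL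
  rcases hrest with hw | ⟨hneg, hbound, hwL, hrows⟩
  · exact Or.inl hw
  · refine Or.inr ⟨by omega, by omega, by omega, ?_⟩
    intro i hi
    have hmem := PySem.List.mem_pyRange_one.mp hi
    have hlen : (PySem.List.pyGetD bd' i []).length = (PySem.List.pyGetD bd i []).length :=
      pvRowLen_eq bd' bd i h.symm (by omega) (by omega)
    obtain ⟨ha, hb2, hc2⟩ := hrows i hi
    rw [hlen]
    exact ⟨ha, hb2, hc2⟩

-- membership in the cell list gives the window bounds
lemma pvCells_mem (r0 c0 w : Int) (p : Int × Int) (hp : p ∈ pvB_cells r0 c0 w) :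
    r0 ≤ p.1 ∧ p.1 < r0 + w ∧ c0 ≤ p.2 ∧ p.2 < c0 + w := by
  rw [pvB_cells] at hp
  simp only [List.mem_flatMap, List.mem_map] at hp
  obtain ⟨i, hi, j, hj, rfl⟩ := hp
  have h1 := PySem.List.mem_pyRange_one.mp hi
  have h2 := PySem.List.mem_pyRange_one.mp hj
  exact ⟨h1.1, h1.2, h2.1, h2.2⟩

lemma pvQuery_eqMB (bd : List (List Int)) (q : List Int) (hP : pvPreQ bd q) :
    pvM_query bd q = pvB_query bd q := by
  obtain ⟨-, hrest⟩ := hP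
  simp only [pvM_query, pvB_query]
  set r0 := PySem.List.pyGetD q 0 0 with hr0def
  set c0 := PySem.List.pyGetD q 1 0 with hc0def
  set w := PySem.List.pyGetD q 2 0 with hwdef
  rcases hrest with hw | ⟨hneg, hbound, hwL, hrows⟩
  · -- empty window: both sides leave the board untouched
    have hcells : pvB_cells r0 c0 w = [] := by
      rw [pvB_cells, PySem.List.pyRange_one_eq_nil (by omega : r0 + w ≤ r0)]
      rfl
    have hrange : PySem.List.pyRange r0 (r0 + w) 1 = [] :=
      PySem.List.pyRange_one_eq_nil (by omega)
    rw [hcells, hrange]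
    have hsort0 : PySem.List.sorted ([] : List (Int × Int)) (pvB_colour r0 c0) false = [] := by
      simpa using pvSortedBinary (pvB_colour r0 c0) [] (by simp)
    have hsortv : PySem.List.sorted ([] : List (Int × Int))
        (fun p => pvGetCell bd p.1 p.2) false = [] := by
      have h := PySem.List.sorted_perm ([] : List (Int × Int))
        (fun p => pvGetCell bd p.1 p.2) false
      exact List.Perm.eq_nil h
    rw [hsortv, hsort0]
    simp
  · -- real window: both sides perform the same set of writes, in permuted order
    have hcol01 : ∀ x ∈ pvB_cells r0 c0 w,
        pvB_colour r0 c0 x = 0 ∨ pvB_colour r0 c0 x = 1 :=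
      fun x _ => pvColour01 r0 c0 x
    have hg0 : pvM_gather bd r0 c0 (r0 + w) (c0 + w) 0
        = ((pvB_cells r0 c0 w).filter (fun x => decide (pvB_colour r0 c0 x = 0))).map
            (fun x => pvGetCell bd x.1 x.2) := pvGather_eq bd r0 c0 w 0
    have hg1 : pvM_gather bd r0 c0 (r0 + w) (c0 + w) 1
        = ((pvB_cells r0 c0 w).filter (fun x => !decide (pvB_colour r0 c0 x = 0))).map
            (fun x => pvGetCell bd x.1 x.2) := by
      rw [pvGather_eq]
      congr 1
      apply List.filter_congr
      intro x _
      rcases pvColour01 r0 c0 x with h | h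
      · simp [h]
      · simp [h]
    set cells := pvB_cells r0 c0 w with hcellsdef
    have hlb : (PySem.List.sorted ((cells.filter
          (fun x => decide (pvB_colour r0 c0 x = 0))).map (fun x => pvGetCell bd x.1 x.2))
          (fun x => x) false).length
        = cells.countP (fun p => decide (pvB_colour r0 c0 p = 0)) := by
      rw [PySem.List.length_sorted, List.length_map, List.countP_eq_length_filter]
    have hlw : (PySem.List.sorted ((cells.filter
          (fun x => !decide (pvB_colour r0 c0 x = 0))).map (fun x => pvGetCell bd x.1 x.2))
          (fun x => x) false).length
        = cells.countP (fun p => !decide (pvB_colour r0 c0 p = 0)) := by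
      rw [PySem.List.length_sorted, List.length_map, List.countP_eq_length_filter]
    rw [hg0, hg1, pvNested_eq_cells, pvAssignList]
    -- RHS: split the two stable sorts and the zip into the two colour classes
    rw [pvSortedBinary (pvB_colour r0 c0) cells hcol01,
        pvSortedBinary (pvB_colour r0 c0)
          (PySem.List.sorted cells (fun p => pvGetCell bd p.1 p.2) false)
          (fun x _ => pvColour01 r0 c0 x),
        List.map_append, pvVals_eq, pvVals_eq]
    rw [List.zip_append (by
      rw [hlb, List.countP_eq_length_filter])]
    -- both sides are now folds of the same writes; compare through the merge stream
    set sB := PySem.List.sorted ((cells.filter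
        (fun x => decide (pvB_colour r0 c0 x = 0))).map (fun x => pvGetCell bd x.1 x.2))
        (fun x => x) false with hsBdef
    set sW := PySem.List.sorted ((cells.filter
        (fun x => !decide (pvB_colour r0 c0 x = 0))).map (fun x => pvGetCell bd x.1 x.2))
        (fun x => x) false with hsWdef
    have hfst := pvMerge_map_fst r0 c0 cells sB sW
    have hnodup : ((pvMerge r0 c0 cells sB sW).map Prod.fst).Nodup := by
      rw [hfst]; exact pvCells_nodup r0 c0 w
    have hcomm : ∀ b : List (List Int), b.map List.length = bd.map List.length →
        ∀ x ∈ pvMerge r0 c0 cells sB sW, ∀ y ∈ pvMerge r0 c0 cells sB sW,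
        pvWrite (pvWrite b x) y = pvWrite (pvWrite b y) x := by
      intro b hb x hx y hy
      by_cases hxy : x.1 = y.1
      · have : x = y := List.inj_on_of_nodup_map hnodup hx hy hxy
        subst this; rfl
      · have hx1 : x.1 ∈ cells := by
          rw [← hfst]; exact List.mem_map_of_mem hx
        have hy1 : y.1 ∈ cells := by
          rw [← hfst]; exact List.mem_map_of_mem hy
        obtain ⟨hxa, hxb, hxc, hxd⟩ := pvCells_mem r0 c0 w _ hx1
        obtain ⟨hya, hyb, hyc, hyd⟩ := pvCells_mem r0 c0 w _ hy1
        have hLb : b.length = bd.length := by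
          have := congrArg List.length hb
          simpa using this
        have hbLZ : (b.length : Int) = (bd.length : Int) := by exact_mod_cast hLb
        have hiR : -(b.length : Int) ≤ x.1.1 ∧ x.1.1 < (b.length : Int) := by
          constructor <;> omega
        have hiR' : -(b.length : Int) ≤ y.1.1 ∧ y.1.1 < (b.length : Int) := by
          constructor <;> omega
        by_cases hii : x.1.1 = y.1.1
        · -- same row, distinct columns
          have hjne : x.1.2 ≠ y.1.2 := fun hc => hxy (Prod.ext hii hc)
          have hmemrow : x.1.1 ∈ PySem.List.pyRange r0 (r0 + w) 1 :=
            PySem.List.mem_pyRange_one.mpr ⟨hxa, hxb⟩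
          obtain ⟨hca, hcb, hcc⟩ := hrows x.1.1 hmemrow
          have hrl : (PySem.List.pyGetD b x.1.1 []).length
              = (PySem.List.pyGetD bd x.1.1 []).length :=
            pvRowLen_eq b bd x.1.1 hb (by omega) (by omega)
          have hrlZ : ((PySem.List.pyGetD b x.1.1 []).length : Int)
              = ((PySem.List.pyGetD bd x.1.1 []).length : Int) := by exact_mod_cast hrl
          refine pvSetCell_comm2 b x.1.1 x.1.2 y.1.1 y.1.2 x.2 y.2 hiR hiR'
            (Or.inr ⟨hii, by omega, by omega, by omega, by omega, ?_⟩)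
          rw [hrl]
          refine pvRes_ne _ c0 w x.1.2 y.1.2 (by omega) (by omega) (by omega)
            hxc hxd ?_ ?_ hjne
          · omega
          · omega
        · -- distinct rows
          refine pvSetCell_comm2 b x.1.1 x.1.2 y.1.1 y.1.2 x.2 y.2 hiR hiR' (Or.inl ?_)
          rw [hLb]
          exact pvRes_ne bd.length r0 w x.1.1 y.1.1 (by omega) (by omega) (by omega)
            hxa hxb hya hyb hii
    have hperm := pvMerge_perm r0 c0 cells sB sW hlb hlw
    exact pvFoldWrite_perm hperm (bd.map List.length) hcomm bd rfl

-- shape preservation and transfer of the per-query precondition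
lemma pvFold_eq :
    ∀ (qs : List (List Int)) (bd : List (List Int)), (∀ q ∈ qs, pvPreQ bd q) →
    qs.foldl pvA_query bd = qs.foldl pvB_query bd := by
  intro qs
  induction qs with
  | nil => intro bd _; rfl
  | cons q t ih =>
    intro bd h
    have hq := h q (by simp)
    have hstep : pvA_query bd q = pvB_query bd q :=
      (pvQuery_eqAM bd q).trans (pvQuery_eqMB bd q hq)
    simp only [List.foldl_cons, hstep]
    exact ih (pvB_query bd q)
      (fun q' hq' => pvPreQ_transfer bd (pvB_query bd q) q'
        (pvB_query_shape bd q).symm (h q' (by simp [hq'])))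

-- ===== VERDICT =====
theorem sort_chessboard_submatrix_spec : Claim_equal_sort_chessboard_submatrix := by
  intro chessboard queries _ hpre
  unfold Spec_sort_chessboard_submatrix sort_chessboard_submatrix sort_chessboard_submatrix_alt
  exact pvFold_eq queries chessboard hpre
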